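-- pv_equiv track=rewrite | github.com/b0bb1e/Python-Bioinformatics | sequencing/spectrum.py | ideal_spectrum
-- ===== SOURCE A (Python) =====
-- def ideal_spectrum(peptide: list, cyclic: bool) -> list:
--     """Finds the ideal spectrum of a peptide
--
--     :param peptide: the peptide (with amino masses in order)
--     :type peptide: list (of ints)
--     :param cyclic: whether to include cyclic sub-peptides
--     :type cyclic: bool
--     :returns: all observed weights in the ideal spectrum, least->greatest
--     :rtype: list (of ints)
--     """
--
--     cum_mass = [0]
--     mass_len = 1
--     # fill cum_mass with the cumalitive mass of peptide prefixes
--     for mass in peptide: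
--         cum_mass.append(cum_mass[mass_len - 1] + mass)
--         mass_len += 1
--
--     # the empty peptide is included in the spectrum
--     spect = [0]
--     # for every pair of cum_mass values, add difference to spect
--     spect += [cum_mass[j] - cum_mass[i]
--              for i in range(mass_len) for j in range(i + 1, mass_len)]
--
--     if cyclic:
--         # the final cumalative mass value is simply the total mass
--         total_mass = cum_mass[mass_len - 1]
--         # for every pair of cum_mass values that doesn't contain an end
--         # add the cyclic peptide, or the total mass minus the above difference
--         spect += [total_mass - (cum_mass[j] - cum_mass[i])
--                   for i in range(1, mass_len)
--                   for j in range(i + 1, mass_len - 1)]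
--
--     spect.sort()
--     return spect
-- ===== SOURCE B (Python) =====
-- def ideal_spectrum(peptide: list, cyclic: bool) -> list:
--     """Direct window summation with running sums: each sub-peptide weight is
--     accumulated in place instead of maintaining a cumulative-mass prefix table
--     and taking pairwise differences."""
--     n = len(peptide)
--     spect = [0]
--     for i in range(n):
--         s = 0
--         for j in range(i, n):
--             s += peptide[j]
--             spect.append(s)
--     if cyclic:
--         pre = 0
--         for i in range(1, n + 1):
--             pre += peptide[i - 1]
--             suf = sum(peptide[i + 1:])
--             for j in range(i + 1, n):
--                 spect.append(suf + pre)
--                 suf -= peptide[j]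
--     spect.sort()
--     return spect
-- ===== Notes on version B (the rewrite author's own statement) =====
-- stated objective: alternative
-- what changed: B drops A's cumulative-mass prefix table, its manual length counter and the pairwise-difference comprehensions, and instead accumulates each linear sub-peptide weight with a running sum and each wrap-around sub-peptide as a shrinking suffix sum plus a growing prefix sum.
import Mathlib
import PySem

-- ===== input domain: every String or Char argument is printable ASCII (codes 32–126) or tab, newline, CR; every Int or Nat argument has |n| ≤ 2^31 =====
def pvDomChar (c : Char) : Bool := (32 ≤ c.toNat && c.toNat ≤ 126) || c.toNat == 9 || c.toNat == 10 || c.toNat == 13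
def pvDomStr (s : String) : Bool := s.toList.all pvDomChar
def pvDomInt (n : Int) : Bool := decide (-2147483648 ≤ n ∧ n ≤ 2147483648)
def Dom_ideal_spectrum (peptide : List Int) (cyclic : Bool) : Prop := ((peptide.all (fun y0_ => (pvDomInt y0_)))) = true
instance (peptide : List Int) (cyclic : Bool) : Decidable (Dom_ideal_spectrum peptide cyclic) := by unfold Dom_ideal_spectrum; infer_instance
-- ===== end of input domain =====

-- B drops A's cumulative-mass prefix table and its pairwise-difference comprehensions,
-- accumulating each sub-peptide weight with running sums instead (a different decomposition).

-- ===== PORT A =====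
-- loop body of "for mass in peptide": append cum_mass[mass_len-1]+mass, bump mass_len.
-- pyGetD with default 0 is exact: the index mass_len-1 is always in range (mass_len = len(cum_mass)).
def pvStepA (st : List Int × Int) (mass : Int) : List Int × Int :=
  (st.1 ++ [PySem.List.pyGetD st.1 (st.2 - 1) 0 + mass], st.2 + 1)

def ideal_spectrum (peptide : List Int) (cyclic : Bool) : List Int :=
  let st := peptide.foldl pvStepA ([0], 1)
  let cumMass := st.1
  let massLen := st.2
  let spect := [0] ++
    (PySem.List.pyRange 0 massLen 1).flatMap (fun i =>
      (PySem.List.pyRange (i + 1) massLen 1).map (fun j =>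
        PySem.List.pyGetD cumMass j 0 - PySem.List.pyGetD cumMass i 0))
  let spect := if cyclic then
      let totalMass := PySem.List.pyGetD cumMass (massLen - 1) 0
      spect ++ (PySem.List.pyRange 1 massLen 1).flatMap (fun i =>
        (PySem.List.pyRange (i + 1) (massLen - 1) 1).map (fun j =>
          totalMass - (PySem.List.pyGetD cumMass j 0 - PySem.List.pyGetD cumMass i 0)))
    else spect
  PySem.List.sorted spect (fun x => x) false

-- ===== PORT B =====
-- pyGetD with default 0 is exact in the three step functions: every index is in range.
-- inner body of the linear loop: s += peptide[j]; spect.append(s)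
def pvStepLin (p : List Int) (st : Int × List Int) (j : Int) : Int × List Int :=
  (st.1 + PySem.List.pyGetD p j 0, st.2 ++ [st.1 + PySem.List.pyGetD p j 0])

-- inner body of the cyclic loop: spect.append(suf + pre); suf -= peptide[j]
def pvStepCycIn (p : List Int) (pre : Int) (st : Int × List Int) (j : Int) : Int × List Int :=
  (st.1 - PySem.List.pyGetD p j 0, st.2 ++ [st.1 + pre])

-- outer body of the cyclic loop: pre += peptide[i-1]; suf = sum(peptide[i+1:]); inner loop
def pvStepCycOut (p : List Int) (n : Int) (st : Int × List Int) (i : Int) : Int × List Int :=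
  let pre := st.1 + PySem.List.pyGetD p (i - 1) 0
  let suf := (PySem.List.slice p (some (i + 1)) none).sum
  (pre, ((PySem.List.pyRange (i + 1) n 1).foldl (pvStepCycIn p pre) (suf, st.2)).2)

def ideal_spectrum_alt (peptide : List Int) (cyclic : Bool) : List Int :=
  let n : Int := peptide.length
  let spect := (PySem.List.pyRange 0 n 1).foldl
      (fun acc i => ((PySem.List.pyRange i n 1).foldl (pvStepLin peptide) (0, acc)).2) [0]
  let spect := if cyclic then
      ((PySem.List.pyRange 1 (n + 1) 1).foldl (pvStepCycOut peptide n) (0, spect)).2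
    else spect
  PySem.List.sorted spect (fun x => x) false

-- ===== PRECONDITION & SPEC =====
def Spec_ideal_spectrum (peptide : List Int) (cyclic : Bool) (out : List Int) : Prop := out = ideal_spectrum_alt peptide cyclic
instance (peptide : List Int) (cyclic : Bool) (out : List Int) : Decidable (Spec_ideal_spectrum peptide cyclic out) := by unfold Spec_ideal_spectrum; infer_instance

-- ===== CLAIM (what is proved, stated in full; the proofs are below) =====
def Claim_equal_ideal_spectrum : Prop := ∀ (peptide : List Int) (cyclic : Bool), Dom_ideal_spectrum peptide cyclic → Spec_ideal_spectrum peptide cyclic (ideal_spectrum peptide cyclic)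

-- ===== LEMMAS AND PROOFS =====

theorem pv_flatMap_congr_mem {α β : Type} (l : List α) (f g : α → List β)
    (h : ∀ a ∈ l, f a = g a) : l.flatMap f = l.flatMap g := by
  induction l with
  | nil => rfl
  | cons x xs ih =>
    simp only [List.flatMap_cons]
    rw [h x (List.mem_cons_self), ih (fun a ha => h a (List.mem_cons_of_mem _ ha))]

-- A's accumulation loop builds the prefix-sum table.
theorem pv_foldA (xs : List Int) : ∀ (c : List Int) (s : Int), c.getLast? = some s →
    xs.foldl pvStepA (c, (c.length : Int)) =
      (c ++ (List.range xs.length).map (fun k => s + (xs.take (k + 1)).sum),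
       ((c.length + xs.length : Nat) : Int)) := by
  induction xs with
  | nil => intro c s _; simp
  | cons x xs ih =>
    intro c s hs
    have hc : c ≠ [] := by intro h; simp [h] at hs
    have hlen : 0 < c.length := List.length_pos_iff.mpr hc
    have hsl : c.getLast hc = s := by
      rw [List.getLast?_eq_some_getLast hc] at hs
      exact Option.some_inj.mp hs
    have hget : PySem.List.pyGetD c ((c.length : Int) - 1) 0 = s := by
      rw [PySem.List.pyGetD_eq_getElem c 0 (by omega) (by omega)]
      have ht : ((c.length : Int) - 1).toNat = c.length - 1 := by omega
      simp only [ht]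
      rw [← List.getLast_eq_getElem hc]
      exact hsl
    have hstep : pvStepA (c, (c.length : Int)) x = (c ++ [s + x], ((c ++ [s + x]).length : Int)) := by
      simp [pvStepA, hget]
    have hlast : (c ++ [s + x]).getLast? = some (s + x) := by simp
    calc (x :: xs).foldl pvStepA (c, (c.length : Int))
        = xs.foldl pvStepA (c ++ [s + x], ((c ++ [s + x]).length : Int)) := by
          rw [List.foldl_cons, hstep]
      _ = (c ++ [s + x] ++ (List.range xs.length).map (fun k => (s + x) + (xs.take (k + 1)).sum),
           (((c ++ [s + x]).length + xs.length : Nat) : Int)) := ih _ _ hlast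
      _ = (c ++ (List.range (x :: xs).length).map (fun k => s + ((x :: xs).take (k + 1)).sum),
           ((c.length + (x :: xs).length : Nat) : Int)) := by
          simp only [Prod.mk.injEq]
          constructor
          · rw [List.append_assoc]
            congr 1
            rw [List.length_cons, List.range_succ_eq_map, List.map_cons, List.map_map]
            simp only [List.take_succ_cons, List.sum_cons, List.singleton_append]
            congr 1
            · simp
            · apply List.map_congr_left
              intro k _
              simp [Function.comp]
              ring
          · simp; ring

def pvCum (p : List Int) : List Int := (List.range (p.length + 1)).map (fun k => (p.take k).sum)

theorem pv_fold_eq (p : List Int) :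
    p.foldl pvStepA ([0], 1) = (pvCum p, (p.length : Int) + 1) := by
  have h := pv_foldA p [0] 0 (by simp)
  simp only [List.length_singleton] at h
  rw [show ((1 : Nat) : Int) = 1 by norm_num] at h
  rw [h]
  simp only [Prod.mk.injEq]
  constructor
  · simp only [pvCum, List.range_succ_eq_map, List.map_cons, List.map_map]
    simp [Function.comp]
  · push_cast; ring

theorem pv_cum_get (p : List Int) (i : Int) (h0 : 0 ≤ i) (h1 : i ≤ (p.length : Int)) :
    PySem.List.pyGetD (pvCum p) i 0 = (p.take i.toNat).sum := by
  rw [PySem.List.pyGetD_eq_getElem _ 0 h0 (by simp [pvCum]; omega)]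
  simp [pvCum]

theorem pv_sum_split (xs : List Int) (a : Nat) :
    xs.sum = (xs.take a).sum + (xs.drop a).sum := by
  conv_lhs => rw [← List.take_append_drop a xs]
  rw [List.sum_append]

-- peptide[j] as a difference of adjacent prefix sums
theorem pv_getD_diff (p : List Int) (j : Int) (h0 : 0 ≤ j) (h1 : j < (p.length : Int)) :
    PySem.List.pyGetD p j 0 = (p.take (j.toNat + 1)).sum - (p.take j.toNat).sum := by
  rw [PySem.List.pyGetD_eq_getElem p 0 h0 (by omega),
      List.sum_take_succ p j.toNat (by omega)]
  ring

-- B's inner linear loop: the running sum emits the weights of windows starting at j₀'s block start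
theorem pv_lin_inner (p : List Int) (n : Int) (hn : n = (p.length : Int)) :
    ∀ (m : Nat) (j₀ s₀ : Int) (acc : List Int), 0 ≤ j₀ → j₀ ≤ n → m = (n - j₀).toNat →
    (PySem.List.pyRange j₀ n 1).foldl (pvStepLin p) (s₀, acc) =
      (s₀ + ((p.take n.toNat).sum - (p.take j₀.toNat).sum),
       acc ++ (PySem.List.pyRange j₀ n 1).map
         (fun j => s₀ + ((p.take (j.toNat + 1)).sum - (p.take j₀.toNat).sum))) := by
  intro m
  induction m with
  | zero =>
    intro j₀ s₀ acc h0 h1 hm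
    have : j₀ = n := by omega
    subst this
    rw [PySem.List.pyRange_one_eq_nil (by omega)]
    simp
  | succ m ih =>
    intro j₀ s₀ acc h0 h1 hm
    have hlt : j₀ < n := by omega
    rw [PySem.List.pyRange_one_cons hlt, List.foldl_cons, List.map_cons]
    have hg : PySem.List.pyGetD p j₀ 0 = (p.take (j₀.toNat + 1)).sum - (p.take j₀.toNat).sum :=
      pv_getD_diff p j₀ h0 (by omega)
    show (PySem.List.pyRange (j₀+1) n 1).foldl (pvStepLin p) (pvStepLin p (s₀, acc) j₀) = _
    rw [show pvStepLin p (s₀, acc) j₀ =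
        (s₀ + PySem.List.pyGetD p j₀ 0, acc ++ [s₀ + PySem.List.pyGetD p j₀ 0]) from rfl]
    rw [ih (j₀ + 1) _ _ (by omega) (by omega) (by omega)]
    have ht : (j₀ + 1).toNat = j₀.toNat + 1 := by omega
    simp only [Prod.mk.injEq, ht, hg]
    constructor
    · ring
    · rw [List.append_assoc, List.singleton_append]
      refine congrArg (acc ++ ·) ?_
      refine congrArg₂ List.cons (by ring) ?_
      apply List.map_congr_left
      intro j _
      ring

-- B's outer linear loop appends, block by block, all linear sub-peptide weights
theorem pv_lin_outer (p : List Int) (n : Int) (hn : n = (p.length : Int)) :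
    ∀ (m : Nat) (i₀ : Int) (acc : List Int), 0 ≤ i₀ → i₀ ≤ n → m = (n - i₀).toNat →
    (PySem.List.pyRange i₀ n 1).foldl
        (fun acc i => ((PySem.List.pyRange i n 1).foldl (pvStepLin p) (0, acc)).2) acc =
      acc ++ (PySem.List.pyRange i₀ n 1).flatMap (fun i =>
        (PySem.List.pyRange i n 1).map
          (fun j => (p.take (j.toNat + 1)).sum - (p.take i.toNat).sum)) := by
  intro m
  induction m with
  | zero =>
    intro i₀ acc h0 h1 hm
    have : i₀ = n := by omega
    subst this
    rw [PySem.List.pyRange_one_eq_nil (by omega)]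
    simp
  | succ m ih =>
    intro i₀ acc h0 h1 hm
    have hlt : i₀ < n := by omega
    rw [PySem.List.pyRange_one_cons hlt, List.foldl_cons, List.flatMap_cons]
    rw [pv_lin_inner p n hn (n - i₀).toNat i₀ 0 acc h0 (by omega) rfl]
    rw [ih (i₀ + 1) _ (by omega) (by omega) (by omega)]
    simp only [zero_add, ← List.append_assoc]

-- B's inner cyclic loop: suf decreases as the window start advances
theorem pv_cyc_inner (p : List Int) (n : Int) (hn : n = (p.length : Int)) (pre : Int) :
    ∀ (m : Nat) (j₀ s₀ : Int) (acc : List Int), 0 ≤ j₀ → j₀ ≤ n → m = (n - j₀).toNat →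
    (PySem.List.pyRange j₀ n 1).foldl (pvStepCycIn p pre) (s₀, acc) =
      (s₀ - ((p.take n.toNat).sum - (p.take j₀.toNat).sum),
       acc ++ (PySem.List.pyRange j₀ n 1).map
         (fun j => s₀ - ((p.take j.toNat).sum - (p.take j₀.toNat).sum) + pre)) := by
  intro m
  induction m with
  | zero =>
    intro j₀ s₀ acc h0 h1 hm
    have : j₀ = n := by omega
    subst this
    rw [PySem.List.pyRange_one_eq_nil (by omega)]
    simp
  | succ m ih =>
    intro j₀ s₀ acc h0 h1 hm
    have hlt : j₀ < n := by omega
    rw [PySem.List.pyRange_one_cons hlt, List.foldl_cons, List.map_cons]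
    have hg : PySem.List.pyGetD p j₀ 0 = (p.take (j₀.toNat + 1)).sum - (p.take j₀.toNat).sum :=
      pv_getD_diff p j₀ h0 (by omega)
    show (PySem.List.pyRange (j₀+1) n 1).foldl (pvStepCycIn p pre) (pvStepCycIn p pre (s₀, acc) j₀) = _
    rw [show pvStepCycIn p pre (s₀, acc) j₀ =
        (s₀ - PySem.List.pyGetD p j₀ 0, acc ++ [s₀ + pre]) from rfl]
    rw [ih (j₀ + 1) _ _ (by omega) (by omega) (by omega)]
    have ht : (j₀ + 1).toNat = j₀.toNat + 1 := by omega
    simp only [Prod.mk.injEq, ht, hg]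
    constructor
    · ring
    · rw [List.append_assoc, List.singleton_append]
      refine congrArg (acc ++ ·) ?_
      refine congrArg₂ List.cons (by ring) ?_
      apply List.map_congr_left
      intro j _
      ring

-- B's outer cyclic loop appends all wrap-around sub-peptide weights
theorem pv_cyc_outer (p : List Int) (n : Int) (hn : n = (p.length : Int)) :
    ∀ (m : Nat) (i₀ : Int) (acc : List Int), 1 ≤ i₀ → i₀ ≤ n + 1 → m = (n + 1 - i₀).toNat →
    (PySem.List.pyRange i₀ (n + 1) 1).foldl (pvStepCycOut p n) ((p.take (i₀ - 1).toNat).sum, acc) =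
      ((p.take n.toNat).sum,
       acc ++ (PySem.List.pyRange i₀ (n + 1) 1).flatMap (fun i =>
         (PySem.List.pyRange (i + 1) n 1).map
           (fun j => p.sum - ((p.take j.toNat).sum - (p.take i.toNat).sum)))) := by
  intro m
  induction m with
  | zero =>
    intro i₀ acc h0 h1 hm
    have : i₀ = n + 1 := by omega
    subst this
    rw [PySem.List.pyRange_one_eq_nil (by omega)]
    simp [show n + 1 - 1 = n from by ring]
  | succ m ih =>
    intro i₀ acc h0 h1 hm
    have hlt : i₀ < n + 1 := by omega
    rw [PySem.List.pyRange_one_cons hlt, List.foldl_cons, List.flatMap_cons]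
    have hpre : (p.take (i₀ - 1).toNat).sum + PySem.List.pyGetD p (i₀ - 1) 0 = (p.take i₀.toNat).sum := by
      rw [pv_getD_diff p (i₀ - 1) (by omega) (by omega)]
      rw [show (i₀ - 1).toNat + 1 = i₀.toNat from by omega]
      ring
    have hsuf : (PySem.List.slice p (some (i₀ + 1)) none).sum = p.sum - (p.take (i₀ + 1).toNat).sum := by
      rw [PySem.List.slice_from p (by omega)]
      have := pv_sum_split p (i₀ + 1).toNat
      omega
    have hstep : pvStepCycOut p n ((p.take (i₀ - 1).toNat).sum, acc) i₀ =
        ((p.take i₀.toNat).sum,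
         acc ++ (PySem.List.pyRange (i₀ + 1) n 1).map
           (fun j => p.sum - ((p.take j.toNat).sum - (p.take i₀.toNat).sum))) := by
      show ((p.take (i₀ - 1).toNat).sum + PySem.List.pyGetD p (i₀ - 1) 0,
            ((PySem.List.pyRange (i₀ + 1) n 1).foldl
              (pvStepCycIn p ((p.take (i₀ - 1).toNat).sum + PySem.List.pyGetD p (i₀ - 1) 0))
              ((PySem.List.slice p (some (i₀ + 1)) none).sum, acc)).2) = _
      rw [hpre, hsuf]
      by_cases hc : i₀ + 1 ≤ n
      · rw [pv_cyc_inner p n hn _ (n - (i₀ + 1)).toNat (i₀ + 1) _ acc (by omega) hc rfl]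
        simp only [Prod.mk.injEq, true_and]
        congr 1
        apply List.map_congr_left
        intro j _
        have ht : (i₀ + 1).toNat = i₀.toNat + 1 := by omega
        rw [ht, List.sum_take_succ p i₀.toNat (by omega)]
        ring
      · rw [PySem.List.pyRange_one_eq_nil (by omega)]
        simp
    rw [hstep]
    have ih' := ih (i₀ + 1) (acc ++ (PySem.List.pyRange (i₀ + 1) n 1).map
      (fun j => p.sum - ((p.take j.toNat).sum - (p.take i₀.toNat).sum))) (by omega) (by omega) (by omega)
    rw [show i₀ + 1 - 1 = i₀ from by ring] at ih'
    rw [ih']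
    simp only [← List.append_assoc]

-- ===== VERDICT (by name: the statement is the Claim_ definition above) =====
theorem ideal_spectrum_spec : Claim_equal_ideal_spectrum := by
  intro peptide cyclic _
  unfold Spec_ideal_spectrum ideal_spectrum ideal_spectrum_alt
  rw [pv_fold_eq]
  simp only []
  set n : Int := (peptide.length : Int) with hn
  have hn0 : 0 ≤ n := by simp [hn]
  -- A's linear part in prefix-sum form, reindexed to match B's blocks
  have hlinA :
      (PySem.List.pyRange 0 (n + 1) 1).flatMap (fun i =>
        (PySem.List.pyRange (i + 1) (n + 1) 1).map (fun j =>
          PySem.List.pyGetD (pvCum peptide) j 0 - PySem.List.pyGetD (pvCum peptide) i 0)) =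
      (PySem.List.pyRange 0 n 1).flatMap (fun i =>
        (PySem.List.pyRange i n 1).map
          (fun j => (peptide.take (j.toNat + 1)).sum - (peptide.take i.toNat).sum)) := by
    rw [PySem.List.pyRange_one_append 0 n (n + 1) hn0 (by omega), List.flatMap_append]
    have hlastnil :
        (PySem.List.pyRange n (n + 1) 1).flatMap (fun i =>
          (PySem.List.pyRange (i + 1) (n + 1) 1).map (fun j =>
            PySem.List.pyGetD (pvCum peptide) j 0 - PySem.List.pyGetD (pvCum peptide) i 0)) = [] := by
      rw [PySem.List.pyRange_one_singleton]
      simp [PySem.List.pyRange_one_eq_nil (by omega : n + 1 ≤ n + 1)]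
    rw [hlastnil, List.append_nil]
    apply pv_flatMap_congr_mem
    intro i hi
    rw [PySem.List.mem_pyRange_one] at hi
    rw [PySem.List.pyRange_one (i + 1) (n + 1), PySem.List.pyRange_one i n,
        show n + 1 - (i + 1) = n - i from by ring, List.map_map, List.map_map]
    apply List.map_congr_left
    intro k hk
    rw [List.mem_range] at hk
    simp only [Function.comp]
    rw [pv_cum_get peptide (i + 1 + (k : Int)) (by omega) (by omega),
        pv_cum_get peptide i (by omega) (by omega),
        show (i + 1 + (k : Int)).toNat = (i + (k : Int)).toNat + 1 from by omega]
  cases cyclic with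
  | false =>
    simp only [Bool.false_eq_true, if_false]
    rw [hlinA, pv_lin_outer peptide n hn n.toNat 0 [0] le_rfl hn0 (by omega)]
  | true =>
    simp only [if_pos]
    have htot : PySem.List.pyGetD (pvCum peptide) (n + 1 - 1) 0 = peptide.sum := by
      rw [show n + 1 - 1 = n from by ring, pv_cum_get peptide n (by omega) (by omega)]
      simp [hn]
    rw [htot, show n + 1 - 1 = n from by ring]
    -- A's cyclic part in prefix-sum form
    have hcycA :
        (PySem.List.pyRange 1 (n + 1) 1).flatMap (fun i =>
          (PySem.List.pyRange (i + 1) n 1).map (fun j =>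
            peptide.sum -
              (PySem.List.pyGetD (pvCum peptide) j 0 - PySem.List.pyGetD (pvCum peptide) i 0))) =
        (PySem.List.pyRange 1 (n + 1) 1).flatMap (fun i =>
          (PySem.List.pyRange (i + 1) n 1).map (fun j =>
            peptide.sum - ((peptide.take j.toNat).sum - (peptide.take i.toNat).sum))) := by
      apply pv_flatMap_congr_mem
      intro i hi
      rw [PySem.List.mem_pyRange_one] at hi
      apply List.map_congr_left
      intro j hj
      rw [PySem.List.mem_pyRange_one] at hj
      rw [pv_cum_get peptide i (by omega) (by omega),
          pv_cum_get peptide j (by omega) (by omega)]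
    have hB := pv_cyc_outer peptide n hn (n + 1 - 1).toNat 1
        ([0] ++ (PySem.List.pyRange 0 n 1).flatMap (fun i =>
          (PySem.List.pyRange i n 1).map
            (fun j => (peptide.take (j.toNat + 1)).sum - (peptide.take i.toNat).sum)))
        le_rfl (by omega) rfl
    rw [show ((1 : Int) - 1).toNat = 0 from by norm_num] at hB
    simp only [List.take_zero, List.sum_nil] at hB
    rw [hlinA, hcycA, pv_lin_outer peptide n hn n.toNat 0 [0] le_rfl hn0 (by omega), hB]
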